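-- pv_equiv track=rewrite | github.com/jaybihola/PyChess | pieces.py | findValidMoves
-- ===== SOURCE A (Python) =====
-- def findValidMoves(current_position, board_size):
--     x, y = current_position
--     possible_moves = []
--
--     # Diagonal moves
--     diagonal_moves_1 = [(x + i, y + i) for i in range(1, board_size) if
--                         x + i < board_size and y + i < board_size]  # Down-right
--     diagonal_moves_2 = [(x - i, y + i) for i in range(1, board_size) if
--                         x - i >= 0 and y + i < board_size]  # Up-right
--     diagonal_moves_3 = [(x + i, y - i) for i in range(1, board_size) if
--                         x + i < board_size and y - i >= 0]  # Down-left
--     diagonal_moves_4 = [(x - i, y - i) for i in range(1, board_size) if x - i >= 0 and y - i >= 0]  # Up-left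
--
--     possible_moves.append(('diagonal up-right', diagonal_moves_1))
--     possible_moves.append(('diagonal up-left', diagonal_moves_2))
--     possible_moves.append(('diagonal down-right', diagonal_moves_3))
--     possible_moves.append(('diagonal down-left', diagonal_moves_4))
--
--     return possible_moves
-- ===== SOURCE B (Python) =====
-- def _inward(c, d, board_size):
--     # the only board edge a walk in direction d can cross: upper edge when d == 1, lower when d == -1
--     return c < board_size if d == 1 else c >= 0
--
--
-- def findValidMoves(current_position, board_size):
--     x, y = current_position
--     directions = [('diagonal up-right', 1, 1), ('diagonal up-left', -1, 1),
--                   ('diagonal down-right', 1, -1), ('diagonal down-left', -1, -1)]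
--     possible_moves = []
--     for label, dx, dy in directions:
--         moves = []
--         i = 1
--         while i < board_size and _inward(x + i * dx, dx, board_size) and _inward(y + i * dy, dy, board_size):
--             moves.append((x + i * dx, y + i * dy))
--             i += 1
--         possible_moves.append((label, moves))
--     return possible_moves
-- ===== Notes on version B (the rewrite author's own statement) =====
-- stated objective: alternative
-- what changed: Replaced A's four parallel filtered range-comprehensions with one loop over a (label,dx,dy) direction table that does a bounded while-walk per direction, stopping at the first off-board step.
import Mathlib
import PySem

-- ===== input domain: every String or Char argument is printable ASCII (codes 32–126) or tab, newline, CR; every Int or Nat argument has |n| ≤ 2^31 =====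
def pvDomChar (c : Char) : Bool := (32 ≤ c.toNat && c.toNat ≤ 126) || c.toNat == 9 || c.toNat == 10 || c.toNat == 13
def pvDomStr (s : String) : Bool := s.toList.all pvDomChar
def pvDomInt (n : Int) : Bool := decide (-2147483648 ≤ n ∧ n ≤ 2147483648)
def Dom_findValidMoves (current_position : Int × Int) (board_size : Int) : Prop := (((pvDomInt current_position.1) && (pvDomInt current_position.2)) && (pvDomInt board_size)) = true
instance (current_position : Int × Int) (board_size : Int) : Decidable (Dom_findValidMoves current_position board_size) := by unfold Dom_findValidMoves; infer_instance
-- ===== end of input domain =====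

-- B replaces A's four parallel filtered range-comprehensions by one loop over a
-- (label, dx, dy) direction table with a bounded while-walk per direction (objective: alternative decomposition).

-- ===== PORT A =====
def findValidMoves (current_position : Int × Int) (board_size : Int) : List (String × (List (Int × Int))) :=
  let x := current_position.1
  let y := current_position.2
  let diagonal_moves_1 := ((PySem.List.pyRange 1 board_size 1).filter
    (fun i => decide (x + i < board_size ∧ y + i < board_size))).map (fun i => (x + i, y + i))
  let diagonal_moves_2 := ((PySem.List.pyRange 1 board_size 1).filter
    (fun i => decide (x - i ≥ 0 ∧ y + i < board_size))).map (fun i => (x - i, y + i))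
  let diagonal_moves_3 := ((PySem.List.pyRange 1 board_size 1).filter
    (fun i => decide (x + i < board_size ∧ y - i ≥ 0))).map (fun i => (x + i, y - i))
  let diagonal_moves_4 := ((PySem.List.pyRange 1 board_size 1).filter
    (fun i => decide (x - i ≥ 0 ∧ y - i ≥ 0))).map (fun i => (x - i, y - i))
  [("diagonal up-right", diagonal_moves_1), ("diagonal up-left", diagonal_moves_2),
   ("diagonal down-right", diagonal_moves_3), ("diagonal down-left", diagonal_moves_4)]

-- ===== PORT B =====
-- the only board edge a walk in direction d can cross: upper edge when d == 1, lower when d == -1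
def pvInward (c d board_size : Int) : Bool :=
  if d == 1 then decide (c < board_size) else decide (c ≥ 0)

def pvWalk (x y dx dy board_size i : Int) : List (Int × Int) :=
  if h : i < board_size ∧ pvInward (x + i * dx) dx board_size = true
           ∧ pvInward (y + i * dy) dy board_size = true then
    (x + i * dx, y + i * dy) :: pvWalk x y dx dy board_size (i + 1)
  else []
termination_by (board_size - i).toNat
decreasing_by omega

def findValidMoves_alt (current_position : Int × Int) (board_size : Int) : List (String × (List (Int × Int))) :=
  let x := current_position.1
  let y := current_position.2
  let directions : List (String × Int × Int) :=
    [("diagonal up-right", 1, 1), ("diagonal up-left", -1, 1),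
     ("diagonal down-right", 1, -1), ("diagonal down-left", -1, -1)]
  directions.foldl (fun possible_moves e =>
    possible_moves ++ [(e.1, pvWalk x y e.2.1 e.2.2 board_size 1)]) []

-- ===== PRECONDITION & SPEC =====
def Spec_findValidMoves (current_position : Int × Int) (board_size : Int) (out : List (String × (List (Int × Int)))) : Prop := out = findValidMoves_alt current_position board_size
instance (current_position : Int × Int) (board_size : Int) (out : List (String × (List (Int × Int)))) : Decidable (Spec_findValidMoves current_position board_size out) := by unfold Spec_findValidMoves; infer_instance

-- ===== CLAIM (what is proved, stated in full; the proofs are below) =====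
def Claim_equal_findValidMoves : Prop := ∀ (current_position : Int × Int) (board_size : Int), Dom_findValidMoves current_position board_size → Spec_findValidMoves current_position board_size (findValidMoves current_position board_size)

-- ===== LEMMAS AND PROOFS =====

lemma pvInward_antitone (c d bs : Int) (hd : d = 1 ∨ d = -1) {i j : Int} (hij : i ≤ j)
    (h : pvInward (c + j * d) d bs = true) : pvInward (c + i * d) d bs = true := by
  rcases hd with h1 | h1 <;> subst h1 <;> simp [pvInward] at * <;> omega

lemma pvWalk_eq (x y dx dy bs : Int) (hdx : dx = 1 ∨ dx = -1) (hdy : dy = 1 ∨ dy = -1)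
    (i : Int) :
    pvWalk x y dx dy bs i =
      ((PySem.List.pyRange i bs 1).filter
        (fun j => pvInward (x + j * dx) dx bs && pvInward (y + j * dy) dy bs)).map
        (fun j => (x + j * dx, y + j * dy)) := by
  have key : ∀ (n : Nat) (i : Int), (bs - i).toNat ≤ n → pvWalk x y dx dy bs i =
      ((PySem.List.pyRange i bs 1).filter
        (fun j => pvInward (x + j * dx) dx bs && pvInward (y + j * dy) dy bs)).map
        (fun j => (x + j * dx, y + j * dy)) := by
    intro n
    induction n with
    | zero =>
      intro i hn
      have hle : bs ≤ i := by omega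
      rw [pvWalk, PySem.List.pyRange_one_eq_nil hle]
      simp; omega
    | succ n ih =>
      intro i hn
      by_cases hib : i < bs
      · rw [pvWalk, PySem.List.pyRange_one_cons hib]
        by_cases hx : pvInward (x + i * dx) dx bs = true
        · by_cases hy : pvInward (y + i * dy) dy bs = true
          · rw [dif_pos ⟨hib, hx, hy⟩]
            simp only [List.filter_cons, hx, hy, Bool.and_self, if_pos, List.map_cons]
            rw [ih (i + 1) (by omega)]
          · rw [dif_neg (by tauto)]
            have hnil : (PySem.List.pyRange i bs 1).filter
                (fun j => pvInward (x + j * dx) dx bs && pvInward (y + j * dy) dy bs) = [] := by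
              rw [List.filter_eq_nil_iff]
              intro j hj
              have hji : i ≤ j := (PySem.List.mem_pyRange_one.mp hj).1
              simp only [Bool.and_eq_true, not_and]
              intro _ hyj
              exact hy (pvInward_antitone y dy bs hdy hji hyj)
            rw [PySem.List.pyRange_one_cons hib] at hnil
            rw [hnil]; rfl
        · rw [dif_neg (by tauto)]
          have hnil : (PySem.List.pyRange i bs 1).filter
              (fun j => pvInward (x + j * dx) dx bs && pvInward (y + j * dy) dy bs) = [] := by
            rw [List.filter_eq_nil_iff]
            intro j hj
            have hji : i ≤ j := (PySem.List.mem_pyRange_one.mp hj).1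
            simp only [Bool.and_eq_true, not_and]
            intro hxj _
            exact hx (pvInward_antitone x dx bs hdx hji hxj)
          rw [PySem.List.pyRange_one_cons hib] at hnil
          rw [hnil]; rfl
      · rw [pvWalk, PySem.List.pyRange_one_eq_nil (by omega)]
        simp; omega
  exact key (bs - i).toNat i le_rfl

-- ===== VERDICT (by name: the statement is the Claim_ definition above) =====
theorem findValidMoves_spec : Claim_equal_findValidMoves := by
  intro cp bs _
  unfold Spec_findValidMoves findValidMoves findValidMoves_alt
  simp only [List.foldl_cons, List.foldl_nil, List.nil_append, List.cons_append]
  rw [pvWalk_eq cp.1 cp.2 1 1 bs (Or.inl rfl) (Or.inl rfl) 1,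
      pvWalk_eq cp.1 cp.2 (-1) 1 bs (Or.inr rfl) (Or.inl rfl) 1,
      pvWalk_eq cp.1 cp.2 1 (-1) bs (Or.inl rfl) (Or.inr rfl) 1,
      pvWalk_eq cp.1 cp.2 (-1) (-1) bs (Or.inr rfl) (Or.inr rfl) 1]
  simp [pvInward, mul_one, sub_eq_add_neg, ge_iff_le, and_comm, Bool.and_comm]
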